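-- pv_equiv track=rewrite | github.com/ppatre96/outlier-campaign-automator | src/linkedin_urn.py | _col_to_human
-- ===== SOURCE A (Python) =====
-- def _col_to_human(col: str) -> str:
--     """
--     Convert binary column name back to a human-readable label.
--     e.g. skills__python → python
--          job_titles_norm__data_scientist → data scientist
--          highest_degree_level__Bachelors → Bachelors
--          experience_band__5-7 → 5-7
--     """
--     prefixes = [
--         "skills__",
--         "job_titles_norm__",
--         "fields_of_study__",
--         "highest_degree_level__",
--         "accreditations_norm__",
--         "experience_band__",
--     ]
--     for p in prefixes:
--         if col.startswith(p):
--             return col[len(p):].replace("_", " ").replace("plus", "+")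
--     return col
-- ===== SOURCE B (Python) =====
-- _PREFIXES = {
--     "skills__",
--     "job_titles_norm__",
--     "fields_of_study__",
--     "highest_degree_level__",
--     "accreditations_norm__",
--     "experience_band__",
-- }
--
--
-- def _col_to_human(col: str) -> str:
--     """Partition on the first '__' and test the candidate prefix by set membership."""
--     before, sep, after = col.partition("__")
--     if before + sep in _PREFIXES:
--         return after.replace("_", " ").replace("plus", "+")
--     return col
-- ===== Notes on version B (the rewrite author's own statement) =====
-- stated objective: idiomatic
-- what changed: Replaces A's loop that tries each of the six known prefixes with startswith by a single partition of col on its first '__' followed by a set-membership test of the candidate prefix.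
import Mathlib
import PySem

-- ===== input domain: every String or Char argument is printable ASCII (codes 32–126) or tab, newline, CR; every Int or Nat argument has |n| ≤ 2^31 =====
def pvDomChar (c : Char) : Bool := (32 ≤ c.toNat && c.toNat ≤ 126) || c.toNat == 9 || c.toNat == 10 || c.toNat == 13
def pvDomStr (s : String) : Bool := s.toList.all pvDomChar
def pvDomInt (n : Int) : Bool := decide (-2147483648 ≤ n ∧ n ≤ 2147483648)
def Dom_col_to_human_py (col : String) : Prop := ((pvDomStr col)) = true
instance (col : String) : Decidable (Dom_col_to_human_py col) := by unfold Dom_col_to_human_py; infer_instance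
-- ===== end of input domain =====

-- B replaces A's linear scan over the six prefixes by one partition on the first "__" plus a set lookup (objective: idiomatic/alternative; not measurably faster).

-- ===== PORT A =====
def pvPrefixesA : List (List Char) :=
  ["skills__".toList, "job_titles_norm__".toList, "fields_of_study__".toList,
   "highest_degree_level__".toList, "accreditations_norm__".toList, "experience_band__".toList]

def pvScanA : List (List Char) → String → String
  | [], col => col
  | p :: ps, col =>
    if PySem.Chars.startswith col.toList p = true then
      String.ofList (PySem.Chars.replace (PySem.Chars.replace
        (PySem.List.slice col.toList (some (p.length : Int)) none) ['_'] [' ']) "plus".toList ['+'])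
    else pvScanA ps col

def col_to_human_py (col : String) : String := pvScanA pvPrefixesA col

-- ===== PORT B =====
def pvPrefixSetB : PySem.Set (List Char) :=
  PySem.Set.ofList ["skills__".toList, "job_titles_norm__".toList, "fields_of_study__".toList,
    "highest_degree_level__".toList, "accreditations_norm__".toList, "experience_band__".toList]

-- col.partition(sep), ported by hand (PySem has no partition): exact — Python splits at the
-- FIRST occurrence of sep, which PySem.Chars.find returns (or -1 when absent).
def pvPartitionB (cs sep : List Char) : List Char × List Char × List Char :=
  let i := PySem.Chars.find cs sep
  if i = -1 then (cs, [], [])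
  else (cs.take i.toNat, sep, cs.drop (i.toNat + sep.length))

def col_to_human_py_alt (col : String) : String :=
  match pvPartitionB col.toList ['_', '_'] with
  | (before, sep, after) =>
    if PySem.Set.contains pvPrefixSetB (before ++ sep) = true then
      String.ofList (PySem.Chars.replace (PySem.Chars.replace after ['_'] [' ']) "plus".toList ['+'])
    else col

-- ===== PRECONDITION & SPEC =====
def Spec_col_to_human_py (col : String) (out : String) : Prop := out = col_to_human_py_alt col
instance (col : String) (out : String) : Decidable (Spec_col_to_human_py col out) := by unfold Spec_col_to_human_py; infer_instance

-- ===== CLAIM (what is proved, stated in full; the proofs are below) =====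
def Claim_equal_col_to_human_py : Prop := ∀ (col : String), Dom_col_to_human_py col → Spec_col_to_human_py col (col_to_human_py col)

-- ===== LEMMAS AND PROOFS =====

theorem pvInfix_of_prefix_drop {cs sub : List Char} {n : Nat} (h : sub <+: cs.drop n) :
    sub <:+: cs :=
  h.isInfix.trans (List.drop_suffix n cs).isInfix

theorem pvFindEq (cs sub : List Char) (n : Nat) (h1 : sub <+: cs.drop n)
    (h2 : ∀ j, j < n → ¬ sub <+: cs.drop j) : PySem.Chars.find cs sub = (n : Int) := by
  have hnn : 0 ≤ PySem.Chars.find cs sub :=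
    (PySem.Chars.find_nonneg_iff cs sub).mpr (pvInfix_of_prefix_drop h1)
  obtain ⟨h3, h4⟩ := PySem.Chars.find_spec hnn
  have heq : (PySem.Chars.find cs sub).toNat = n := by
    rcases lt_trichotomy (PySem.Chars.find cs sub).toNat n with h | h | h
    · exact absurd h3 (h2 _ h)
    · exact h
    · exact absurd h1 (h4 _ h)
  omega

theorem pvFindOfStarts (cs q : List Char)
    (hq : PySem.Chars.isIn ['_', '_'] (q ++ ['_']) = false)
    (h : (q ++ ['_', '_']) <+: cs) :
    PySem.Chars.find cs ['_', '_'] = (q.length : Int) := by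
  have hnq : ¬ ['_', '_'] <:+: (q ++ ['_']) := (PySem.Chars.isIn_eq_false_iff _ _).mp hq
  apply pvFindEq
  · obtain ⟨r, hr⟩ := h
    refine ⟨r, ?_⟩
    rw [← hr, List.append_assoc, List.drop_left' rfl]
  · intro j hj hcon
    have hstep : (q ++ ['_']) <+: (q ++ ['_', '_']) := ⟨['_'], by simp⟩
    have hpre : (q ++ ['_']) <+: cs := hstep.trans h
    have hdp : (q ++ ['_']).drop j <+: cs.drop j := hpre.drop j
    have hlen : (['_', '_'] : List Char).length ≤ ((q ++ ['_']).drop j).length := by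
      simp; omega
    exact hnq (pvInfix_of_prefix_drop (n := j)
      (List.prefix_of_prefix_length_le hcon hdp hlen))

theorem pvCandPrefix {cs : List Char} {k : Nat} (h : ['_', '_'] <+: cs.drop k) :
    (cs.take k ++ ['_', '_']) <+: cs := by
  obtain ⟨r, hr⟩ := h
  exact ⟨r, by rw [List.append_assoc, hr, List.take_append_drop]⟩

theorem pvPosCase (col : String) (q : List Char)
    (hq : PySem.Chars.isIn ['_', '_'] (q ++ ['_']) = false)
    (hmem : PySem.Set.contains pvPrefixSetB (q ++ ['_', '_']) = true)
    (h : PySem.Chars.startswith col.toList (q ++ ['_', '_']) = true) :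
    col_to_human_py_alt col =
      String.ofList (PySem.Chars.replace (PySem.Chars.replace
        (PySem.List.slice col.toList (some ((q ++ ['_', '_']).length : Int)) none) ['_'] [' '])
        "plus".toList ['+']) := by
  have hpre : (q ++ ['_', '_']) <+: col.toList := (PySem.Chars.startswith_iff _ _).mp h
  have hf := pvFindOfStarts col.toList q hq hpre
  have htake2 : col.toList.take (q.length + 2) = q ++ ['_', '_'] := by
    have := List.prefix_iff_eq_take.mp hpre
    simpa using this.symm
  have htake : col.toList.take q.length = q := by
    calc col.toList.take q.length
        = (col.toList.take (q.length + 2)).take q.length := by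
          rw [List.take_take]; congr 1; omega
      _ = (q ++ ['_', '_']).take q.length := by rw [htake2]
      _ = q := by simp
  have hslice : PySem.List.slice col.toList (some ((q ++ ['_', '_']).length : Int)) none
      = col.toList.drop (q.length + 2) := by
    have := PySem.List.slice_from_natCast (xs := col.toList) (a := (q ++ ['_', '_']).length)
    simpa using this
  simp only [col_to_human_py_alt, pvPartitionB, hf]
  rw [if_neg (by omega : ¬ ((q.length : Int) = -1))]
  simp only [Int.toNat_natCast, htake, List.length_cons, List.length_nil]
  rw [if_pos hmem, hslice]

theorem pvNoMatchContains (col : String) (p : List Char) (_ : p ∈ pvPrefixesA)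
    (hs : ¬ PySem.Chars.startswith col.toList p = true) : ¬ p <+: col.toList := fun hc =>
  hs ((PySem.Chars.startswith_iff _ _).mpr hc)

theorem pvMainEq (col : String) : col_to_human_py col = col_to_human_py_alt col := by
  by_cases h1 : PySem.Chars.startswith col.toList "skills__".toList = true
  · simp only [col_to_human_py, pvPrefixesA, pvScanA, h1, if_pos]
    rw [show ("skills__".toList) = "skills".toList ++ ['_', '_'] from by decide] at h1 ⊢
    rw [pvPosCase col "skills".toList (by decide) (by decide) h1]
  · by_cases h2 : PySem.Chars.startswith col.toList "job_titles_norm__".toList = true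
    · simp only [col_to_human_py, pvPrefixesA, pvScanA, h1, h2, if_pos]
      rw [show ("job_titles_norm__".toList) = "job_titles_norm".toList ++ ['_', '_'] from by decide] at h2 ⊢
      rw [pvPosCase col "job_titles_norm".toList (by decide) (by decide) h2]
      simp
    · by_cases h3 : PySem.Chars.startswith col.toList "fields_of_study__".toList = true
      · simp only [col_to_human_py, pvPrefixesA, pvScanA, h1, h2, h3, if_pos]
        rw [show ("fields_of_study__".toList) = "fields_of_study".toList ++ ['_', '_'] from by decide] at h3 ⊢
        rw [pvPosCase col "fields_of_study".toList (by decide) (by decide) h3]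
        simp
      · by_cases h4 : PySem.Chars.startswith col.toList "highest_degree_level__".toList = true
        · simp only [col_to_human_py, pvPrefixesA, pvScanA, h1, h2, h3, h4, if_pos]
          rw [show ("highest_degree_level__".toList) = "highest_degree_level".toList ++ ['_', '_'] from by decide] at h4 ⊢
          rw [pvPosCase col "highest_degree_level".toList (by decide) (by decide) h4]
          simp
        · by_cases h5 : PySem.Chars.startswith col.toList "accreditations_norm__".toList = true
          · simp only [col_to_human_py, pvPrefixesA, pvScanA, h1, h2, h3, h4, h5, if_pos]
            rw [show ("accreditations_norm__".toList) = "accreditations_norm".toList ++ ['_', '_'] from by decide] at h5 ⊢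
            rw [pvPosCase col "accreditations_norm".toList (by decide) (by decide) h5]
            simp
          · by_cases h6 : PySem.Chars.startswith col.toList "experience_band__".toList = true
            · simp only [col_to_human_py, pvPrefixesA, pvScanA, h1, h2, h3, h4, h5, h6, if_pos]
              rw [show ("experience_band__".toList) = "experience_band".toList ++ ['_', '_'] from by decide] at h6 ⊢
              rw [pvPosCase col "experience_band".toList (by decide) (by decide) h6]
              simp
            · -- no prefix matches: both sides return col
              have hA : col_to_human_py col = col := by
                simp only [col_to_human_py, pvPrefixesA, pvScanA]
                rw [if_neg h1, if_neg h2, if_neg h3, if_neg h4, if_neg h5, if_neg h6]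
              rw [hA]
              have hnp : ∀ p ∈ pvPrefixesA, ¬ p <+: col.toList := by
                intro p hp
                simp only [pvPrefixesA, List.mem_cons, List.not_mem_nil, or_false] at hp
                rcases hp with rfl | rfl | rfl | rfl | rfl | rfl
                exacts [pvNoMatchContains col _ (by decide) h1, pvNoMatchContains col _ (by decide) h2,
                  pvNoMatchContains col _ (by decide) h3, pvNoMatchContains col _ (by decide) h4,
                  pvNoMatchContains col _ (by decide) h5, pvNoMatchContains col _ (by decide) h6]
              by_cases hf : PySem.Chars.find col.toList ['_', '_'] = -1
              · simp only [col_to_human_py_alt, pvPartitionB, hf, if_pos, List.append_nil]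
                rw [if_neg]
                intro hc
                simp only [pvPrefixSetB, PySem.Set.contains, PySem.Set.ofList] at hc
                have : col.toList ∈ ["skills__".toList, "job_titles_norm__".toList, "fields_of_study__".toList,
                  "highest_degree_level__".toList, "accreditations_norm__".toList, "experience_band__".toList] := by
                  simpa using hc
                simp only [List.mem_cons, List.not_mem_nil, or_false] at this
                rcases this with h | h | h | h | h | h
                exacts [hnp "skills__".toList (by decide) (by rw [h]),
                  hnp "job_titles_norm__".toList (by decide) (by rw [h]),
                  hnp "fields_of_study__".toList (by decide) (by rw [h]),
                  hnp "highest_degree_level__".toList (by decide) (by rw [h]),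
                  hnp "accreditations_norm__".toList (by decide) (by rw [h]),
                  hnp "experience_band__".toList (by decide) (by rw [h])]
              · have hnn : 0 ≤ PySem.Chars.find col.toList ['_', '_'] := by
                  have := PySem.Chars.neg_one_le_find col.toList ['_', '_']
                  omega
                obtain ⟨h3', _⟩ := PySem.Chars.find_spec hnn
                simp only [col_to_human_py_alt, pvPartitionB]
                rw [if_neg hf]
                rw [if_neg]
                intro hc
                simp only [pvPrefixSetB, PySem.Set.contains, PySem.Set.ofList] at hc
                have hmem2 : (col.toList.take (PySem.Chars.find col.toList ['_', '_']).toNat ++ ['_', '_']) ∈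
                  ["skills__".toList, "job_titles_norm__".toList, "fields_of_study__".toList,
                   "highest_degree_level__".toList, "accreditations_norm__".toList, "experience_band__".toList] := by
                  simpa using hc
                have hcp := pvCandPrefix h3'
                simp only [List.mem_cons, List.not_mem_nil, or_false] at hmem2
                rcases hmem2 with h | h | h | h | h | h
                exacts [hnp "skills__".toList (by decide) (h ▸ hcp),
                  hnp "job_titles_norm__".toList (by decide) (h ▸ hcp),
                  hnp "fields_of_study__".toList (by decide) (h ▸ hcp),
                  hnp "highest_degree_level__".toList (by decide) (h ▸ hcp),
                  hnp "accreditations_norm__".toList (by decide) (h ▸ hcp),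
                  hnp "experience_band__".toList (by decide) (h ▸ hcp)]

-- ===== VERDICT (by name: the statement is the Claim_ definition above) =====
theorem col_to_human_py_spec : Claim_equal_col_to_human_py := by
  intro col _
  unfold Spec_col_to_human_py
  exact pvMainEq col
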